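-- pv_equiv track=rewrite | github.com/ji-nyu/ai-systems-2026 | assignments/week-05/202321010/update_state.py | parse_response_for_completion
-- ===== SOURCE A (Python) =====
-- def parse_response_for_completion(response):
--     """
--     Detect task completion signals in LLM response
--     """
--     completion_signals = [
--         "completed",
--         "done",
--         "finished",
--         "implemented",
--         "success",
--         "working"
--     ]
--
--     for signal in completion_signals:
--         if signal.lower() in response.lower():
--             return True
--     return False
-- ===== SOURCE B (Python) =====
-- def parse_response_for_completion(response):
--     """
--     Detect task completion signals in LLM response.
--     Single left-to-right scan: at each position, test whether any keyword
--     starts there (response lowered once up front).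
--     """
--     low = response.lower()
--     keywords = ("completed", "done", "finished", "implemented", "success", "working")
--     for i in range(len(low)):
--         for kw in keywords:
--             if low.startswith(kw, i):
--                 return True
--     return False
-- ===== Notes on version B (the rewrite author's own statement) =====
-- stated objective: alternative
-- what changed: B lowers the response once and does a single positional scan testing each keyword as a prefix at every offset, instead of A's per-keyword substring search that re-lowers the response for each of the six keywords.
import Mathlib
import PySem

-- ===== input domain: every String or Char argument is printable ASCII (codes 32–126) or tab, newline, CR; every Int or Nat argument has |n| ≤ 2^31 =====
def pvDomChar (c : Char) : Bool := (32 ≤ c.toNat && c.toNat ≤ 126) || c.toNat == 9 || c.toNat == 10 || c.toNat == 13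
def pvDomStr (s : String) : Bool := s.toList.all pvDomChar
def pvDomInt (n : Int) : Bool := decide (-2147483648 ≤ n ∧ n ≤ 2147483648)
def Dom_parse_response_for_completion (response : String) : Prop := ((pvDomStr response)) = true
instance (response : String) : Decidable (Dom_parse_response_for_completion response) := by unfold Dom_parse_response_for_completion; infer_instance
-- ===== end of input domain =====

-- B replaces A's per-keyword substring loop by one positional scan of the response
-- (lowered once) testing each keyword as a prefix at every offset; alternative, not faster.

-- ===== PORT A =====
-- A's keyword loop with early return: for each signal, 'signal.lower() in response.lower()'.
def pvALoop (signals : List String) (response : String) : Bool :=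
  match signals with
  | [] => false
  | s :: rest =>
    if PySem.Str.isIn (PySem.Str.lower s) (PySem.Str.lower response) then true
    else pvALoop rest response

def parse_response_for_completion (response : String) : Bool :=
  pvALoop ["completed", "done", "finished", "implemented", "success", "working"] response

-- ===== PORT B =====
def pvKeywords : List (List Char) :=
  ["completed".toList, "done".toList, "finished".toList,
   "implemented".toList, "success".toList, "working".toList]

-- B's scan: for i in range(len(low)): for kw in keywords: if low.startswith(kw, i) …
def pvScan (cs : List Char) : Bool :=
  match cs with
  | [] => false
  | c :: rest => pvKeywords.any (fun kw => kw.isPrefixOf (c :: rest)) || pvScan rest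

def parse_response_for_completion_alt (response : String) : Bool :=
  pvScan (PySem.Chars.lower response.toList)

-- ===== PRECONDITION & SPEC =====
def Spec_parse_response_for_completion (response : String) (out : Bool) : Prop := out = parse_response_for_completion_alt response
instance (response : String) (out : Bool) : Decidable (Spec_parse_response_for_completion response out) := by unfold Spec_parse_response_for_completion; infer_instance

-- ===== CLAIM (what is proved, stated in full; the proofs are below) =====
def Claim_equal_parse_response_for_completion : Prop := ∀ (response : String), Dom_parse_response_for_completion response → Spec_parse_response_for_completion response (parse_response_for_completion response)

-- ===== LEMMAS AND PROOFS =====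

-- One Boolean fact: testing a keyword as infix of c :: rest splits into prefix-here or infix-later.
lemma pvInfix_cons_split (k : List Char) (c : Char) (rest : List Char) :
    decide (k <:+: c :: rest) = (k.isPrefixOf (c :: rest) || decide (k <:+: rest)) := by
  by_cases hp : k <+: c :: rest <;> by_cases hi : k <:+: rest <;>
    simp [List.infix_cons_iff, List.isPrefixOf_iff_prefix, Bool.eq_false_iff, hp, hi]

-- B's positional scan decides "some keyword is an infix".
lemma pvScan_eq_any_infix (cs : List Char) :
    pvScan cs = pvKeywords.any (fun kw => decide (kw <:+: cs)) := by
  induction cs with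
  | nil => simp [pvScan, pvKeywords, List.infix_nil]
  | cons c rest ih =>
    rw [pvScan, ih]
    have key : ∀ (kws : List (List Char)),
        ((kws.any (fun kw => kw.isPrefixOf (c :: rest))) ||
            (kws.any (fun kw => decide (kw <:+: rest))))
          = kws.any (fun kw => decide (kw <:+: c :: rest)) := by
      intro kws
      induction kws with
      | nil => rfl
      | cons k ks ihk =>
        rw [List.any_cons, List.any_cons, List.any_cons, ← ihk, pvInfix_cons_split]
        cases k.isPrefixOf (c :: rest) <;> cases decide (k <:+: rest) <;>
          cases ks.any (fun kw => kw.isPrefixOf (c :: rest)) <;>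
          cases ks.any (fun kw => decide (kw <:+: rest)) <;> simp
    exact key pvKeywords

-- A's early-return loop is an 'any' over the signals.
lemma pvALoop_eq_any (signals : List String) (response : String) :
    pvALoop signals response
      = signals.any (fun s => PySem.Str.isIn (PySem.Str.lower s) (PySem.Str.lower response)) := by
  induction signals with
  | nil => rfl
  | cons s rest ih =>
    simp only [pvALoop, List.any_cons, ih]
    cases h : PySem.Str.isIn (PySem.Str.lower s) (PySem.Str.lower response) <;>
      simp [h]

-- ===== VERDICT (by name: the statement is the Claim_ definition above) =====
theorem parse_response_for_completion_spec : Claim_equal_parse_response_for_completion := by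
  intro response _
  unfold Spec_parse_response_for_completion parse_response_for_completion
    parse_response_for_completion_alt
  rw [pvALoop_eq_any, pvScan_eq_any_infix]
  have hl : ∀ (kw : String), PySem.Str.isIn (PySem.Str.lower kw) (PySem.Str.lower response)
      = decide ((PySem.Chars.lower kw.toList) <:+: PySem.Chars.lower response.toList) := by
    intro kw
    rw [show PySem.Str.isIn (PySem.Str.lower kw) (PySem.Str.lower response)
        = PySem.Chars.isIn (PySem.Chars.lower kw.toList) (PySem.Chars.lower response.toList) from by
      simp]
    by_cases h : (PySem.Chars.lower kw.toList) <:+: PySem.Chars.lower response.toList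
    · rw [(PySem.Chars.isIn_iff_infix _ _).mpr h, decide_eq_true h]
    · have hfalse : PySem.Chars.isIn (PySem.Chars.lower kw.toList)
          (PySem.Chars.lower response.toList) = false := by
        rw [Bool.eq_false_iff]
        exact fun hb => h ((PySem.Chars.isIn_iff_infix _ _).mp hb)
      rw [hfalse, decide_eq_false h]
  simp only [pvKeywords, List.any_cons, List.any_nil, hl,
    show PySem.Chars.lower "completed".toList = "completed".toList from by decide,
    show PySem.Chars.lower "done".toList = "done".toList from by decide,
    show PySem.Chars.lower "finished".toList = "finished".toList from by decide,
    show PySem.Chars.lower "implemented".toList = "implemented".toList from by decide,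
    show PySem.Chars.lower "success".toList = "success".toList from by decide,
    show PySem.Chars.lower "working".toList = "working".toList from by decide]
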